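-- pv_equiv track=rewrite | github.com/coder-brunette/leetcode_goldman_sachs_questions | dict_string_form_words.py | check_string_and_word_from_dict
-- ===== SOURCE A (Python) =====
-- def check_string_and_word_from_dict(d, str):
--     longest_word = ""
--     str_lst = list(str)
--
--     def can_form_word(word, letters):
--         word_count = {}
--         for letter in word:
--             word_count[letter] = word_count.get(letter, 0) + 1
--         for letter in word_count:
--             if letter not in letters and word_count[letter] > letters.count(letter):
--                 return False
--         return True
--
--     for word in d:
--         if can_form_word(word, str_lst) and len(word) > len(longest_word):
--             longest_word = word
--     return longest_word
-- ===== SOURCE B (Python) =====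
-- def check_string_and_word_from_dict(d, str):
--     str_set = set(str)
--     for word in sorted(d, key=len, reverse=True):
--         if set(word) <= str_set:
--             return word
--     return ""
-- ===== Notes on version B (the rewrite author's own statement) =====
-- stated objective: faster
-- what changed: Replaces A's per-word letter-counting dict plus repeated letters.count scans with a set(str) built once, a stable length-descending sort, and a return of the first word whose character set is a subset of str's.
import Mathlib
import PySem

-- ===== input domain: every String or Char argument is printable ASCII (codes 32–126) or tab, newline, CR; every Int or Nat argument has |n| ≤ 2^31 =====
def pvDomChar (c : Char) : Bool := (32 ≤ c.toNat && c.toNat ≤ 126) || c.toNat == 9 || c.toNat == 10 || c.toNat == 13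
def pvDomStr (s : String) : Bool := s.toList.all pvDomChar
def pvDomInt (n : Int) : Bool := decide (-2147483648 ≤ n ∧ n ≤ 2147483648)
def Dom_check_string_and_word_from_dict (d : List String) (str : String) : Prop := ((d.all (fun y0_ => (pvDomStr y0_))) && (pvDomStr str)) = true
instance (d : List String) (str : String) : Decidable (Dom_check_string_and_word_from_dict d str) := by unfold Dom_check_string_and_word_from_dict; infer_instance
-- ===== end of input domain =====

-- B builds set(str) once and returns the first word of a stable length-descending sort whose
-- character set is a subset of it, replacing A's per-word counting dict and repeated count scans.


-- ===== PORT A =====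
-- the inner helper can_form_word(word, letters): counting dict, then a loop over its keys
-- (the early 'return False' is the negated conjunct inside List.all)
def canFormWord (word : List Char) (letters : List Char) : Bool :=
  let word_count : PySem.Dict Char Int :=
    word.foldl (fun d letter => d.insert letter (d.getD letter 0 + 1)) PySem.Dict.empty
  word_count.keys.all (fun letter =>
    !(!(letters.contains letter) && decide ((letters.count letter : Int) < word_count.getD letter 0)))

def check_string_and_word_from_dict (d : List String) (str : String) : String :=
  let str_lst := str.toList
  d.foldl (fun longest_word word =>
    if canFormWord word.toList str_lst
        && decide (PySem.Str.len longest_word < PySem.Str.len word) then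
      word
    else
      longest_word) ""

-- ===== PORT B =====
def check_string_and_word_from_dict_alt (d : List String) (str : String) : String :=
  let str_set : PySem.Set Char := PySem.Set.ofList str.toList
  match (PySem.List.sorted d PySem.Str.len true).find?
      (fun word => (PySem.Set.ofList word.toList).issubset str_set) with
  | some word => word
  | none => ""

-- ===== PRECONDITION & SPEC =====
def Spec_check_string_and_word_from_dict (d : List String) (str : String) (out : String) : Prop := out = check_string_and_word_from_dict_alt d str
instance (d : List String) (str : String) (out : String) : Decidable (Spec_check_string_and_word_from_dict d str out) := by unfold Spec_check_string_and_word_from_dict; infer_instance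

-- ===== CLAIM (what is proved, stated in full; the proofs are below) =====
def Claim_equal_check_string_and_word_from_dict : Prop := ∀ (d : List String) (str : String), Dom_check_string_and_word_from_dict d str → Spec_check_string_and_word_from_dict d str (check_string_and_word_from_dict d str)

-- ===== LEMMAS AND PROOFS =====

theorem bool_and_left {a b : Bool} (h : (a && b) = true) : a = true := by
  cases a <;> simp_all

theorem bool_and_right {a b : Bool} (h : (a && b) = true) : b = true := by
  cases a <;> simp_all

theorem bool_and_intro {a b : Bool} (h1 : a = true) (h2 : b = true) : (a && b) = true := by
  simp [h1, h2]

-- A's multiplicity check degenerates to letter presence: every counter key occurs in the word,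
-- so for a letter absent from 'letters' the comparison 'word_count[letter] > 0' always fires.
theorem canFormWord_eq (word letters : List Char) :
    canFormWord word letters = word.all (fun c => letters.contains c) := by
  have hrfl : canFormWord word letters
      = (PySem.Dict.counter word).keys.all (fun letter =>
          !(!(letters.contains letter)
            && decide ((letters.count letter : Int) < (PySem.Dict.counter word).getD letter 0))) := rfl
  rw [hrfl, PySem.Dict.keys_counter]
  apply Bool.eq_iff_iff.mpr
  simp only [List.all_eq_true, PySem.Set.mem_ofList, PySem.Dict.getD_counter]
  constructor
  · intro h c hc
    by_contra hcon
    have hmem : c ∉ letters := by simpa using hcon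
    have hthis := h c hc
    have h0 : letters.count c = 0 := List.count_eq_zero.mpr hmem
    have h1 : 0 < word.count c := List.count_pos_iff.mpr hc
    rw [(by simpa using hcon : letters.contains c = false)] at hthis
    simp only [Bool.not_false, Bool.true_and, Bool.not_eq_true', decide_eq_false_iff_not,
      not_lt, h0, Nat.cast_zero] at hthis
    omega
  · intro h c hc
    rw [(by simpa using h c hc : letters.contains c = true)]
    rfl

-- B's subset test is the same letter-presence check
theorem issubset_eq (word letters : List Char) :
    (PySem.Set.ofList word).issubset (PySem.Set.ofList letters)
      = word.all (fun c => letters.contains c) := by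
  apply Bool.eq_iff_iff.mpr
  rw [PySem.Set.issubset_iff]
  simp [PySem.Set.mem_ofList, List.all_eq_true]

-- first match of p in 'insertBy x S', for a length-descending S, from the first match in S
theorem find?_insertBy_desc (p : String → Bool) (x : String) (S : List String)
    (hS : S.Pairwise (fun a b => PySem.Str.len b ≤ PySem.Str.len a)) :
    (PySem.List.insertBy (fun a b => decide (PySem.Str.len b < PySem.Str.len a)) x S).find? p
      = match S.find? p with
        | some w => if p x && decide (PySem.Str.len w < PySem.Str.len x) then some x else some w
        | none => if p x then some x else none := by
  induction S with
  | nil => by_cases hpx : p x = true <;> simp [PySem.List.insertBy, hpx]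
  | cons y t ih =>
    have hy : ∀ z ∈ t, PySem.Str.len z ≤ PySem.Str.len y := (List.pairwise_cons.mp hS).1
    have ht := (List.pairwise_cons.mp hS).2
    show ((if (decide (PySem.Str.len y < PySem.Str.len x)) = true then x :: y :: t
        else y :: PySem.List.insertBy _ x t).find? p) = _
    by_cases hlt : PySem.Str.len y < PySem.Str.len x
    · rw [if_pos (decide_eq_true hlt)]
      by_cases hpx : p x = true
      · rw [List.find?_cons_of_pos hpx]
        cases hfy : (y :: t).find? p with
        | some w =>
          have hwlen : PySem.Str.len w ≤ PySem.Str.len y := by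
            rcases (by simpa using List.mem_of_find?_eq_some hfy : w = y ∨ w ∈ t) with rfl | hw
            · exact le_refl _
            · exact hy w hw
          show some x = if (p x && decide (PySem.Str.len w < PySem.Str.len x)) = true
              then some x else some w
          rw [if_pos (bool_and_intro hpx (decide_eq_true (lt_of_le_of_lt hwlen hlt)))]
        | none =>
          show some x = if p x = true then some x else none
          rw [if_pos hpx]
      · rw [List.find?_cons_of_neg (by simpa using hpx)]
        cases hfy : (y :: t).find? p with
        | some w =>
          show some w = if (p x && decide (PySem.Str.len w < PySem.Str.len x)) = true
              then some x else some w
          rw [if_neg (fun hc => hpx (bool_and_left hc))]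
        | none =>
          show (none : Option String) = if p x = true then some x else none
          rw [if_neg hpx]
    · rw [if_neg (by simp only [decide_eq_true_eq]; exact hlt)]
      by_cases hpy : p y = true
      · rw [List.find?_cons_of_pos hpy, List.find?_cons_of_pos hpy]
        show some y = if (p x && decide (PySem.Str.len y < PySem.Str.len x)) = true
            then some x else some y
        rw [if_neg (fun hc => hlt (of_decide_eq_true (bool_and_right hc)))]
      · rw [List.find?_cons_of_neg (by simpa using hpy),
          List.find?_cons_of_neg (by simpa using hpy), ih ht]

-- a string of nonpositive Python length is ""
theorem len_zero_eq_empty (x : String) (h : ¬ (0 : Int) < PySem.Str.len x) : x = "" := by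
  rw [PySem.Str.len_eq] at h
  have h0 : x.toList.length = 0 := by omega
  exact String.toList_eq_nil_iff.mp (List.length_eq_zero_iff.mp h0)

-- A's record-keeping fold equals 'first match of p in the stable length-descending sort'
theorem fold_eq_find_sorted (p : String → Bool) (d : List String) :
    d.foldl (fun longest_word word =>
        if p word && decide (PySem.Str.len longest_word < PySem.Str.len word) then word
        else longest_word) ""
      = ((PySem.List.sorted d PySem.Str.len true).find? p).getD "" := by
  rw [PySem.List.sorted_rev_eq_foldl_insertBy]
  induction d using List.reverseRecOn with
  | nil => simp
  | append_singleton d x ih =>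
    rw [List.foldl_append, List.foldl_append]
    simp only [List.foldl_cons, List.foldl_nil]
    have hpair : (d.foldl (fun acc w =>
        PySem.List.insertBy (fun a b => decide (PySem.Str.len b < PySem.Str.len a)) w acc) []).Pairwise
        (fun a b => PySem.Str.len b ≤ PySem.Str.len a) := by
      rw [← PySem.List.sorted_rev_eq_foldl_insertBy]
      exact PySem.List.sorted_pairwise_rev d PySem.Str.len
    rw [find?_insertBy_desc p x _ hpair, ih]
    cases hf : (d.foldl (fun acc w =>
        PySem.List.insertBy (fun a b => decide (PySem.Str.len b < PySem.Str.len a)) w acc) []).find? p with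
    | some w =>
      show (if (p x && decide (PySem.Str.len w < PySem.Str.len x)) = true then x else w)
        = (if (p x && decide (PySem.Str.len w < PySem.Str.len x)) = true
            then some x else some w).getD ""
      by_cases c : (p x && decide (PySem.Str.len w < PySem.Str.len x)) = true
      · rw [if_pos c, if_pos c]; rfl
      · rw [if_neg c, if_neg c]; rfl
    | none =>
      show (if (p x && decide (PySem.Str.len "" < PySem.Str.len x)) = true then x else "")
        = (if p x = true then some x else none).getD ""
      by_cases hpx : p x = true
      · by_cases hl : (0 : Int) < PySem.Str.len x
        · have h0 : PySem.Str.len "" = 0 := rfl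
          rw [if_pos (bool_and_intro hpx (decide_eq_true (by rw [h0]; exact hl))),
            if_pos hpx]
          rfl
        · have hx := len_zero_eq_empty x hl
          subst hx
          rw [if_neg (fun hc => lt_irrefl _ (of_decide_eq_true (bool_and_right hc))),
            if_pos hpx]
          rfl
      · rw [if_neg (fun hc => hpx (bool_and_left hc)), if_neg hpx]
        rfl

-- ===== VERDICT (by name: the statement is the Claim_ definition above) =====
theorem check_string_and_word_from_dict_spec : Claim_equal_check_string_and_word_from_dict := by
  intro d str _
  unfold Spec_check_string_and_word_from_dict
  have hpred : (fun w : String => (PySem.Set.ofList w.toList).issubset (PySem.Set.ofList str.toList))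
      = (fun w : String => canFormWord w.toList str.toList) := by
    funext w
    rw [canFormWord_eq, issubset_eq]
  show (d.foldl (fun longest_word word =>
      if canFormWord word.toList str.toList
          && decide (PySem.Str.len longest_word < PySem.Str.len word) then word
      else longest_word) "")
    = (match (PySem.List.sorted d PySem.Str.len true).find?
        (fun word => (PySem.Set.ofList word.toList).issubset (PySem.Set.ofList str.toList)) with
      | some word => word
      | none => "")
  rw [hpred, fold_eq_find_sorted (fun w => canFormWord w.toList str.toList) d]
  cases hf : (PySem.List.sorted d PySem.Str.len true).find?
      (fun w => canFormWord w.toList str.toList) with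
  | some w => rfl
  | none => rfl
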